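-- pv_equiv track=rewrite | github.com/helloshowup/hope-clean | showup_tools/simplified_app/rag_system/textbook_vector_db.py | _build_section_context
-- ===== SOURCE A (Python) =====
-- from typing import List, Dict, Any, Optional, Set
--
-- def _build_section_context(headings: List[tuple], current_idx: int) -> List[str]:
--     """Build hierarchical context of parent headings for a section.
--
--     Args:
--         headings: List of (level, title, position) tuples
--         current_idx: Index of current heading
--
--     Returns:
--         List of parent heading titles in hierarchical order
--     """
--     current_level = headings[current_idx][0]
--     context = []
--
--     # Look backwards to find parent headings of higher levels
--     for i in range(current_idx-1, -1, -1):
--         level, title, _ = headings[i]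
--         if level < current_level:
--             context.insert(0, title)
--             current_level = level
--             # Stop when we reach the top level (H1)
--             if level == 1:
--                 break
--
--     return context
-- ===== SOURCE B (Python) =====
-- def _build_section_context(headings, current_idx):
--     """Build hierarchical context of parent headings for a section.
--
--     One forward pass over the headings before current_idx keeps a monotonic
--     stack of candidate ancestors with strictly increasing levels; what is
--     left under the current heading's level is the parent chain in order.
--     """
--     current_level = headings[current_idx][0]
--
--     stack = []
--     for h in headings[:current_idx]:
--         while stack and stack[-1][0] >= h[0]:
--             stack.pop()
--         stack.append(h)
--     while stack and stack[-1][0] >= current_level: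
--         stack.pop()
--
--     # walk up from the nearest ancestor, stopping at the top-level (H1) heading
--     context = []
--     for level, title, _ in reversed(stack):
--         context.append(title)
--         if level == 1:
--             break
--     context.reverse()
--     return context
-- ===== Notes on version B (the rewrite author's own statement) =====
-- stated objective: alternative
-- what changed: Replaced the backward scan that tracks a shrinking current level and does context.insert(0, ...) by a single forward monotonic-stack pass whose surviving stack is the ancestor chain already in order, read off from the nearest ancestor up to the first H1.
-- outside the precondition, e.g. on _build_section_context([(1, 'a', 0), (2, 'b', 1)], -1): A returns [], B returns ['a']
import Mathlib
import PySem

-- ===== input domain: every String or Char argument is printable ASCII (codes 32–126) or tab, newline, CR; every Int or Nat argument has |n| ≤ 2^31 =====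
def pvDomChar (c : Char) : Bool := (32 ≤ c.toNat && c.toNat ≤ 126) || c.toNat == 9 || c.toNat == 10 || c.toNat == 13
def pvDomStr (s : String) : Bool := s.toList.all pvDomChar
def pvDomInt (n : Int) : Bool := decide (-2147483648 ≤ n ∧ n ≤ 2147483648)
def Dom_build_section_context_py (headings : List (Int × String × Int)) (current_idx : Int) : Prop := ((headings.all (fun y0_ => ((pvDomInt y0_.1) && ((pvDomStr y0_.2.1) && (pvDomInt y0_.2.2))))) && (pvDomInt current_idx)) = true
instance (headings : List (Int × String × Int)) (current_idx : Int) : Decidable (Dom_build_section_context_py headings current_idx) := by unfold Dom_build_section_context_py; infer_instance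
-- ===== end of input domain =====

-- B replaces A's backward scan (with context.insert(0, …)) by one forward monotonic-stack
-- pass; same return value on every non-negative in-range index (alternative decomposition).

-- ===== PORT A =====
-- the backward for-loop of A: state (current_level, context), break at level == 1
def pvALoop (headings : List (Int × String × Int)) :
    List Int → Int → List String → List String
  | [], _, context => context
  | i :: rest, current_level, context =>
    match PySem.List.pyGet? headings i with
    | none => context                    -- IndexError; unreachable under Pre_
    | some (level, title, _) =>
      if level < current_level then
        let context' := title :: context           -- context.insert(0, title)
        if level = 1 then context'                 -- break
        else pvALoop headings rest level context'
      else pvALoop headings rest current_level context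

def build_section_context_py (headings : List (Int × String × Int)) (current_idx : Int) : List String :=
  match PySem.List.pyGet? headings current_idx with
  | none => []                           -- headings[current_idx] raises: outside Pre_
  | some (current_level, _, _) =>
      pvALoop headings (PySem.List.pyRange (current_idx - 1) (-1) (-1)) current_level []

-- ===== PORT B =====
-- B's stack, transcribed top-first (head = Python's stack[-1]); the inner while-pop loop:
def pvPopGE (lvl : Int) : List (Int × String × Int) → List (Int × String × Int)
  | [] => []
  | h :: t => if lvl ≤ h.1 then pvPopGE lvl t else h :: t

-- B's final for-loop over reversed(stack) with break at level == 1
def pvTrunc : List (Int × String × Int) → List String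
  | [] => []
  | (level, title, _) :: t => if level = 1 then [title] else title :: pvTrunc t

def build_section_context_py_alt (headings : List (Int × String × Int)) (current_idx : Int) : List String :=
  match PySem.List.pyGet? headings current_idx with
  | none => []                           -- headings[current_idx] raises: outside Pre_
  | some cur =>
    let stackRev := (PySem.List.slice headings none (some current_idx)).foldl
        (fun st h => h :: pvPopGE h.1 st) []
    (pvTrunc (pvPopGE cur.1 stackRev)).reverse

-- ===== PRECONDITION & SPEC =====
-- Pre_ excludes indices out of range (A raises IndexError) and negative in-range indices:
-- there A's backward range is empty so it returns [], while B reads the wrapped index's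
-- chain — both accidental readings of a corner no caller specifies.
def Pre_build_section_context_py (headings : List (Int × String × Int)) (current_idx : Int) : Prop :=
  0 ≤ current_idx ∧ current_idx < headings.length

instance (headings : List (Int × String × Int)) (current_idx : Int) : Decidable (Pre_build_section_context_py headings current_idx) := by unfold Pre_build_section_context_py; infer_instance

def pvWitness_build_section_context_py : (List (Int × String × Int)) × Int :=
  ([(1, "A", 0), (2, "B", 1)], 1)

def Spec_build_section_context_py (headings : List (Int × String × Int)) (current_idx : Int) (out : List String) : Prop := out = build_section_context_py_alt headings current_idx
instance (headings : List (Int × String × Int)) (current_idx : Int) (out : List String) : Decidable (Spec_build_section_context_py headings current_idx out) := by unfold Spec_build_section_context_py; infer_instance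

-- ===== CLAIM (what is proved, stated in full; the proofs are below) =====
def Claim_equal_build_section_context_py : Prop := ∀ (headings : List (Int × String × Int)) (current_idx : Int), Dom_build_section_context_py headings current_idx → Pre_build_section_context_py headings current_idx → Spec_build_section_context_py headings current_idx (build_section_context_py headings current_idx)

-- ===== LEMMAS AND PROOFS =====

-- the common specification: the strictly-decreasing ancestor chain of a backward list
def pvChain (lvl : Int) : List (Int × String × Int) → List (Int × String × Int)
  | [] => []
  | h :: t => if h.1 < lvl then h :: pvChain h.1 t else pvChain lvl t

theorem pvPopGE_chain (t : List (Int × String × Int)) :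
    ∀ lvl cl, lvl ≤ cl → pvPopGE lvl (pvChain cl t) = pvChain lvl t := by
  induction t with
  | nil => intro lvl cl _; simp [pvChain, pvPopGE]
  | cons h t ih =>
    intro lvl cl hle
    by_cases h1 : h.1 < cl
    · simp only [pvChain, if_pos h1]
      by_cases h2 : h.1 < lvl
      · simp [pvPopGE, not_le.mpr h2, if_pos h2]
      · simp only [pvPopGE, if_pos (not_lt.mp h2)]
        rw [ih lvl h.1 (not_lt.mp h2), if_neg h2]
    · simp only [pvChain, if_neg h1]
      rw [ih lvl cl hle]
      have h2 : ¬ h.1 < lvl := fun hlt => h1 (lt_of_lt_of_le hlt hle)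
      rw [if_neg h2]

theorem pvFoldl_stack (P : List (Int × String × Int)) :
    ∀ lvl, pvPopGE lvl (P.foldl (fun st h => h :: pvPopGE h.1 st) []) = pvChain lvl P.reverse := by
  induction P using List.reverseRecOn with
  | nil => intro lvl; simp [pvPopGE, pvChain]
  | append_singleton P h ih =>
    intro lvl
    rw [List.foldl_append, List.foldl_cons, List.foldl_nil, List.reverse_append,
        List.reverse_singleton, List.singleton_append]
    by_cases h1 : h.1 < lvl
    · simp only [pvPopGE, if_neg (not_le.mpr h1), pvChain, if_pos h1, ih h.1]
    · simp only [pvPopGE, if_pos (not_lt.mp h1), pvChain, if_neg h1]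
      rw [ih h.1, pvPopGE_chain _ lvl h.1 (not_lt.mp h1)]

theorem pvALoop_spec (headings : List (Int × String × Int)) :
    ∀ (n : Nat), n ≤ headings.length → ∀ (cl : Int) (ctx : List String),
      pvALoop headings (PySem.List.pyRange ((n : Int) - 1) (-1) (-1)) cl ctx
        = (pvTrunc (pvChain cl ((headings.take n).reverse))).reverse ++ ctx := by
  intro n
  induction n with
  | zero =>
    intro _ cl ctx
    rw [PySem.List.pyRange_neg_one_eq_nil (by omega)]
    simp [pvALoop, pvChain, pvTrunc]
  | succ n ih =>
    intro hn cl ctx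
    have hn' : n < headings.length := by omega
    have hrange : PySem.List.pyRange (((n : Nat) + 1 : Int) - 1) (-1) (-1)
        = (n : Int) :: PySem.List.pyRange ((n : Int) - 1) (-1) (-1) := by
      have : (((n : Nat) + 1 : Int) - 1) = (n : Int) := by omega
      rw [this, PySem.List.pyRange_neg_one_cons (by omega)]
    have hget : PySem.List.pyGet? headings ((n : Int)) = some headings[n] := by
      simp [hn']
    have htake : (headings.take (n + 1)).reverse
        = headings[n] :: (headings.take n).reverse := by
      rw [List.take_add_one, List.getElem?_eq_getElem hn']
      simp
    push_cast
    rw [hrange, htake]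
    rcases hh : headings[n] with ⟨level, title, pos⟩
    simp only [pvALoop, hget, hh]
    by_cases h1 : level < cl
    · by_cases h2 : level = 1
      · subst h2
        simp [pvChain, pvTrunc, h1]
      · simp only [if_pos h1, if_neg h2]
        rw [ih (by omega) level (title :: ctx)]
        simp [pvChain, pvTrunc, h1, h2]
    · simp only [if_neg h1]
      rw [ih (by omega) cl ctx]
      simp [pvChain, h1]

-- ===== VERDICT (by name: the statement is the Claim_ definition above) =====
theorem build_section_context_py_spec : Claim_equal_build_section_context_py := by
  intro headings current_idx _ hpre
  obtain ⟨h0, hlen⟩ := hpre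
  unfold Spec_build_section_context_py
  obtain ⟨n, rfl⟩ : ∃ n : Nat, current_idx = (n : Int) := ⟨current_idx.toNat, (Int.toNat_of_nonneg h0).symm⟩
  have hn : n < headings.length := by exact_mod_cast hlen
  have hget : PySem.List.pyGet? headings ((n : Int)) = some headings[n] := by
    simp [hn]
  unfold build_section_context_py build_section_context_py_alt
  rw [hget]
  rcases hh : headings[n] with ⟨level, title, pos⟩
  simp only
  rw [pvALoop_spec headings n (le_of_lt hn) level []]
  rw [PySem.List.slice_to_natCast, pvFoldl_stack]
  simp
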